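-- pv_equiv track=rewrite | github.com/bigger124/androidMvpCreator | mvpCreator.py | get_java_file_name_lower_first
-- ===== SOURCE A (Python) =====
-- def upper_first(name):
--     first = name[0:1]
--     rest = name[1:]
--     return first.upper() + rest
--
-- def get_java_file_name_lower_first(name):
--     arr = name.split('-')
--     ret = ''
--     for value in arr:
--         ret += upper_first(value)
--     temp = ret[0:1]
--     rest = ret[1:]
--     return temp.lower() + rest
-- ===== SOURCE B (Python) =====
-- def get_java_file_name_lower_first(name):
--     out = []
--     start = True
--     for ch in name:
--         if ch == '-':
--             start = True
--         else:
--             out.append(ch.upper() if start else ch)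
--             start = False
--     result = ''.join(out)
--     return result[0:1].lower() + result[1:]
-- ===== Notes on version B (the rewrite author's own statement) =====
-- stated objective: alternative
-- what changed: Replaced splitting on hyphens plus per-segment capitalize-and-concatenate with a single character-level scan carrying a start-of-new-segment boolean, then lowercasing the first character of the built string.
import Mathlib
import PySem

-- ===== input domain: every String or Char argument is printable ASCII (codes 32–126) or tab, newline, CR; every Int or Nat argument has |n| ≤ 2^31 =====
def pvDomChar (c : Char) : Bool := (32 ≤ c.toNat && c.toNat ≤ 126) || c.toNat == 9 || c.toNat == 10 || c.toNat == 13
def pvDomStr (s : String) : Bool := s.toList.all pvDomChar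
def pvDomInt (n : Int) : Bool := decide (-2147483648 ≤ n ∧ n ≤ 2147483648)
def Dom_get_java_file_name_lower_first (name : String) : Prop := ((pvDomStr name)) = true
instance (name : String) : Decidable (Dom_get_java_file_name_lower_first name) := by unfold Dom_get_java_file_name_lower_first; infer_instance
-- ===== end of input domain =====

-- B replaces A's hyphen-split plus per-segment upper_first concatenation by one character
-- scan with a start-of-new-segment flag (objective: alternative decomposition, same result).
-- Strings are ported on code points (List Char); Python's '+' on str is List.append there.

-- ===== PORT A =====
-- upper_first(name): name[0:1].upper() + name[1:]
def upper_first_chars (name : List Char) : List Char :=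
  let first := PySem.List.slice name (some 0) (some 1)
  let rest := PySem.List.slice name (some 1) none
  PySem.Chars.upper first ++ rest

def get_java_file_name_lower_first (name : String) : String :=
  -- arr = name.split('-')  (sep ≠ '', so str.split is PySem.Chars.splitOn)
  let arr := PySem.Chars.splitOn name.toList ['-']
  -- ret = ''; for value in arr: ret += upper_first(value)
  let ret := arr.foldl (fun acc v => acc ++ upper_first_chars v) []
  -- temp = ret[0:1]; rest = ret[1:]; return temp.lower() + rest
  let temp := PySem.List.slice ret (some 0) (some 1)
  let rest := PySem.List.slice ret (some 1) none
  String.ofList (PySem.Chars.lower temp ++ rest)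

-- ===== PORT B =====
-- the for-loop over name's characters with its (out, start) state, as structural recursion
def altScan : List Char → Bool → List Char
  | [], _ => []
  | c :: cs, start =>
      if c = '-' then altScan cs true
      else (if start then PySem.Chars.upperChar c else c) :: altScan cs false

def get_java_file_name_lower_first_alt (name : String) : String :=
  let result := altScan name.toList true
  -- return result[0:1].lower() + result[1:]
  String.ofList (PySem.Chars.lower (PySem.List.slice result (some 0) (some 1))
      ++ PySem.List.slice result (some 1) none)

-- ===== PRECONDITION & SPEC =====
def Spec_get_java_file_name_lower_first (name : String) (out : String) : Prop := out = get_java_file_name_lower_first_alt name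
instance (name : String) (out : String) : Decidable (Spec_get_java_file_name_lower_first name out) := by unfold Spec_get_java_file_name_lower_first; infer_instance

-- ===== CLAIM (what is proved, stated in full; the proofs are below) =====
def Claim_equal_get_java_file_name_lower_first : Prop := ∀ (name : String), Dom_get_java_file_name_lower_first name → Spec_get_java_file_name_lower_first name (get_java_file_name_lower_first name)

-- ===== LEMMAS AND PROOFS =====

-- a direct structural description of splitting on '-'
def mySplit : List Char → List (List Char)
  | [] => [[]]
  | c :: rest =>
      if c = '-' then [] :: mySplit rest
      else (c :: (mySplit rest).headI) :: (mySplit rest).tail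

theorem mySplit_ne_nil (l : List Char) : mySplit l ≠ [] := by
  cases l with
  | nil => simp [mySplit]
  | cons c rest => simp only [mySplit]; split <;> simp

theorem mySplit_eq_cons (l : List Char) :
    mySplit l = (mySplit l).headI :: (mySplit l).tail := by
  cases h : mySplit l with
  | nil => exact absurd h (mySplit_ne_nil l)
  | cons x xs => simp

theorem splitOn_go_char (fuel : Nat) :
    ∀ (l cur : List Char) (acc : List (List Char)), l.length < fuel →
    PySem.Chars.splitOn.go ['-'] fuel l cur acc
      = acc.reverse ++ ((cur.reverse ++ (mySplit l).headI) :: (mySplit l).tail) := by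
  induction fuel with
  | zero => intro l cur acc h; omega
  | succ f ih =>
    intro l cur acc h
    cases l with
    | nil =>
      simp [PySem.Chars.splitOn.go, mySplit]
    | cons c rest =>
      rw [PySem.Chars.splitOn.go]
      by_cases hc : c = '-'
      · subst hc
        simp only [List.isPrefixOf, BEq.rfl, Bool.true_and, if_pos, List.length_cons,
          List.length_nil, Nat.zero_add, List.drop_succ_cons, List.drop_zero]
        rw [ih rest [] (cur.reverse :: acc) (by simpa using Nat.lt_of_succ_lt_succ h)]
        simp [mySplit]
        exact (mySplit_eq_cons rest).symm
      · have hp : (['-'].isPrefixOf (c :: rest)) = false := by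
          simp [List.isPrefixOf]; exact fun h' => absurd h'.symm hc
        rw [if_neg (by simp [hp])]
        rw [ih rest (c :: cur) acc (by simpa using Nat.lt_of_succ_lt_succ h)]
        simp [mySplit, hc]

theorem splitOn_char (l : List Char) :
    PySem.Chars.splitOn l ['-'] = mySplit l := by
  rw [PySem.Chars.splitOn, splitOn_go_char (l.length + 1) l [] [] (by omega)]
  simp [← mySplit_eq_cons]

theorem upper_first_chars_nil : upper_first_chars [] = [] := by
  simp [upper_first_chars, PySem.List.slice, PySem.Chars.upper]

theorem upper_first_chars_cons (c : Char) (cs : List Char) :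
    upper_first_chars (c :: cs) = PySem.Chars.upperChar c :: cs := by
  simp [upper_first_chars, PySem.List.slice, PySem.Chars.upper, PySem.List.clampIdx]

theorem flatMap_mySplit (l : List Char) :
    (mySplit l).flatMap upper_first_chars = altScan l true
      ∧ (mySplit l).headI ++ ((mySplit l).tail).flatMap upper_first_chars = altScan l false := by
  induction l with
  | nil => simp [mySplit, altScan, upper_first_chars_nil]
  | cons c rest ih =>
    by_cases hc : c = '-'
    · subst hc
      refine ⟨?_, ?_⟩ <;>
        simp [mySplit, altScan, ih.1, upper_first_chars_nil]
    · have hm : mySplit (c :: rest) = (c :: (mySplit rest).headI) :: (mySplit rest).tail := by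
        simp [mySplit, hc]
      refine ⟨?_, ?_⟩ <;>
        simp [hm, altScan, hc, upper_first_chars_cons, ih.2]

-- ===== VERDICT (by name: the statement is the Claim_ definition above) =====
theorem get_java_file_name_lower_first_spec : Claim_equal_get_java_file_name_lower_first := by
  intro name _
  unfold Spec_get_java_file_name_lower_first
  simp only [get_java_file_name_lower_first, get_java_file_name_lower_first_alt, splitOn_char,
    PySem.List.foldl_append_eq_flatMap, List.nil_append, (flatMap_mySplit name.toList).1]
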